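-- pv_equiv track=rewrite | github.com/Meista765/BAEKJOON | BFS/02146. 다리만들기/02146_re.py | bfs_island_labeling_and_edges
-- ===== SOURCE A (Python) =====
-- from collections import deque
--
-- def bfs_island_labeling_and_edges(N, arr):
--     directions = [(1, 0), (0, 1), (-1, 0), (0, -1)]
--     visited = [[0] * N for _ in range(N)]
--     label = 1
--     edges = []
--
--     for r in range(N):
--         for c in range(N):
--             if arr[r][c] == 1 and not visited[r][c]:
--                 queue = deque([(r, c)])
--                 visited[r][c] = 1
--                 arr[r][c] = label
--                 island_edges = []
--
--                 while queue:
--                     cur_r, cur_c = queue.popleft()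
--                     is_edge = False
--
--                     for dr, dc in directions:
--                         nr, nc = cur_r + dr, cur_c + dc
--                         if 0 <= nr < N and 0 <= nc < N:
--                             if arr[nr][nc] == 1 and not visited[nr][nc]:
--                                 visited[nr][nc] = 1
--                                 arr[nr][nc] = label
--                                 queue.append((nr, nc))
--                             elif arr[nr][nc] == 0:
--                                 is_edge = True
--
--                     if is_edge:
--                         island_edges.append((cur_r, cur_c, 0))
--
--                 edges.append(island_edges)
--                 label += 1
--
--     return edges
-- ===== SOURCE B (Python) =====
-- def bfs_island_labeling_and_edges(N, arr):
--     # water mask from the original grid (water cells are never mutated)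
--     water = [[arr[r][c] == 0 for c in range(N)] for r in range(N)]
--     visited = [[0] * N for _ in range(N)]
--     label = 1
--     edges = []
--
--     for r in range(N):
--         for c in range(N):
--             if arr[r][c] == 1 and not visited[r][c]:
--                 visited[r][c] = 1
--                 arr[r][c] = label
--                 # flood fill with a head pointer; the grown list IS the pop order
--                 queue = [(r, c)]
--                 head = 0
--                 while head < len(queue):
--                     cr, cc = queue[head]
--                     head += 1
--                     for nr, nc in ((cr + 1, cc), (cr, cc + 1), (cr - 1, cc), (cr, cc - 1)):
--                         if 0 <= nr < N and 0 <= nc < N and arr[nr][nc] == 1 and not visited[nr][nc]: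
--                             visited[nr][nc] = 1
--                             arr[nr][nc] = label
--                             queue.append((nr, nc))
--                 edges.append([(a, b, 0) for a, b in queue
--                               if any(0 <= x < N and 0 <= y < N and water[x][y]
--                                      for x, y in ((a + 1, b), (a, b + 1), (a - 1, b), (a, b - 1)))])
--                 label += 1
--
--     return edges
-- ===== Notes on version B (the rewrite author's own statement) =====
-- stated objective: alternative
-- what changed: B decomposes the interleaved deque-BFS: it precomputes a water mask from the original grid, flood-fills with a plain list and a head pointer (the grown list itself is the pop order, so no deque and no is_edge flag inside the BFS), and derives each island's boundary list in a separate filter pass afterwards.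
import Mathlib
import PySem

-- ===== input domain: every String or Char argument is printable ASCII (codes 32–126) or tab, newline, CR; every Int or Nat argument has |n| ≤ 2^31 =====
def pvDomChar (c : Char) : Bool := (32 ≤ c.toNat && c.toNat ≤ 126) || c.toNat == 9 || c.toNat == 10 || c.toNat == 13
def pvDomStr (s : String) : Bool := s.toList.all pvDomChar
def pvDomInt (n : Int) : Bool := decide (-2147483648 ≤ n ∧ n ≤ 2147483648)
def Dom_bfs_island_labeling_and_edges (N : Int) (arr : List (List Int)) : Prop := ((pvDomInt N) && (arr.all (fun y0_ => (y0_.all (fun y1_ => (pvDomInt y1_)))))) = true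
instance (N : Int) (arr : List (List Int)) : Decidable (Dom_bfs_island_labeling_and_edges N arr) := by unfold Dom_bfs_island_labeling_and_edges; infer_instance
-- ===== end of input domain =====

-- B separates concerns: water mask precomputed, flood fill over a head-pointer list (no deque;
-- the grown list is the pop order), boundary cells derived by a filter pass after each island's
-- BFS. Equivalence is about the RETURN value (both Pythons mutate arr identically, relabeling
-- island cells; the Lean ports thread arr as state).

-- ===== PORT A =====
-- shared low-level grid primitives: Python's `m[r][c]` read and `m[r][c] = v` write (indices here
-- are always nonnegative; the default is never observed on inputs satisfying Pre_)
def g2 (m : List (List Int)) (r c : Nat) : Int := (m.getD r []).getD c 0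
def set2 (m : List (List Int)) (r c : Nat) (v : Int) : List (List Int) :=
  m.modify r (fun row => row.set c v)
def pvDirs : List (Int × Int) := [(1, 0), (0, 1), (-1, 0), (0, -1)]

-- the `for dr, dc in directions` body of A: threads (visited, arr), collects appended queue
-- entries, and accumulates the is_edge flag
def stepA (N lab : Int) (vis arr : List (List Int)) (r c : Int) :
    List (List Int) × List (List Int) × List (Int × Int) × Bool :=
  pvDirs.foldl (fun st d =>
    let nr := r + d.1
    let nc := c + d.2
    if 0 ≤ nr ∧ nr < N ∧ 0 ≤ nc ∧ nc < N then
      if g2 st.2.1 nr.toNat nc.toNat = 1 ∧ g2 st.1 nr.toNat nc.toNat = 0 then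
        (set2 st.1 nr.toNat nc.toNat 1, set2 st.2.1 nr.toNat nc.toNat lab,
         st.2.2.1 ++ [(nr, nc)], st.2.2.2)
      else if g2 st.2.1 nr.toNat nc.toNat = 0 then
        (st.1, st.2.1, st.2.2.1, true)
      else st
    else st) (vis, arr, [], false)

-- A's `while queue` loop (fuel ≥ number of pops; each cell is enqueued at most once, so
-- N²+1 steps always suffice — the fuel guard only makes the recursion total)
def loopA (N lab : Int) :
    Nat → List (List Int) → List (List Int) → List (Int × Int) → List (Int × Int × Int) →
    List (List Int) × List (List Int) × List (Int × Int × Int)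
  | 0, vis, arr, _, acc => (vis, arr, acc)
  | _ + 1, vis, arr, [], acc => (vis, arr, acc)
  | f + 1, vis, arr, (r, c) :: rest, acc =>
      let s := stepA N lab vis arr r c
      loopA N lab f s.1 s.2.1 (rest ++ s.2.2.1)
        (acc ++ if s.2.2.2 then [(r, c, 0)] else [])

def bfs_island_labeling_and_edges (N : Int) (arr : List (List Int)) :
    List (List (Int × Int × Int)) :=
  ((PySem.List.pyRange 0 N 1).foldl (fun st r =>
    (PySem.List.pyRange 0 N 1).foldl (fun st c =>
      if g2 st.2.1 r.toNat c.toNat = 1 ∧ g2 st.1 r.toNat c.toNat = 0 then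
        let vis := set2 st.1 r.toNat c.toNat 1
        let a := set2 st.2.1 r.toNat c.toNat st.2.2.1
        let res := loopA N st.2.2.1 (N.toNat * N.toNat + 1) vis a [(r, c)] []
        (res.1, res.2.1, st.2.2.1 + 1, st.2.2.2 ++ [res.2.2])
      else st) st)
    (List.replicate N.toNat (List.replicate N.toNat 0), arr, 1, [])).2.2.2

-- ===== PORT B =====
-- `water = [[arr[r][c] == 0 for c in range(N)] for r in range(N)]`
def waterOf (N : Int) (arr : List (List Int)) : List (List Bool) :=
  (PySem.List.pyRange 0 N 1).map (fun r =>
    (PySem.List.pyRange 0 N 1).map (fun c => g2 arr r.toNat c.toNat == 0))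

def wAt (w : List (List Bool)) (r c : Nat) : Bool := (w.getD r []).getD c false

-- the four neighbour coordinates ((cr+1,cc), (cr,cc+1), (cr-1,cc), (cr,cc-1))
def nbrs (r c : Int) : List (Int × Int) := [(r + 1, c), (r, c + 1), (r - 1, c), (r, c - 1)]

-- `any(0 <= x < N and 0 <= y < N and water[x][y] for x, y in ...)`
def hasWaterNbr (N : Int) (w : List (List Bool)) (r c : Int) : Bool :=
  (nbrs r c).any (fun p =>
    decide (0 ≤ p.1 ∧ p.1 < N ∧ 0 ≤ p.2 ∧ p.2 < N) && wAt w p.1.toNat p.2.toNat)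

-- the post-BFS comprehension building one island's boundary list from the pop order
def renderEdges (N : Int) (w : List (List Bool)) (cells : List (Int × Int)) :
    List (Int × Int × Int) :=
  (cells.filter (fun p => hasWaterNbr N w p.1 p.2)).map (fun p => (p.1, p.2, (0 : Int)))

-- B's `for nr, nc in ...` body: pure flood-fill expansion over the neighbour coordinates
def stepB (N lab : Int) (vis arr : List (List Int)) (r c : Int) :
    List (List Int) × List (List Int) × List (Int × Int) :=
  (nbrs r c).foldl (fun st p =>
    if (0 ≤ p.1 ∧ p.1 < N ∧ 0 ≤ p.2 ∧ p.2 < N) ∧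
        g2 st.2.1 p.1.toNat p.2.toNat = 1 ∧ g2 st.1 p.1.toNat p.2.toNat = 0 then
      (set2 st.1 p.1.toNat p.2.toNat 1, set2 st.2.1 p.1.toNat p.2.toNat lab,
       st.2.2 ++ [p])
    else st) (vis, arr, [])

-- B's `while head < len(queue)` loop: the grown queue itself is the pop order
-- (fuel exceeds the possible number of pops; the fuel-0 fallback is unreachable and
-- returns the popped prefix)
def loopB (N lab : Int) :
    Nat → List (List Int) → List (List Int) → List (Int × Int) → Nat →
    List (List Int) × List (List Int) × List (Int × Int)
  | 0, vis, arr, queue, head => (vis, arr, queue.take head)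
  | f + 1, vis, arr, queue, head =>
      match queue[head]? with
      | none => (vis, arr, queue)
      | some p =>
          let s := stepB N lab vis arr p.1 p.2
          loopB N lab f s.1 s.2.1 (queue ++ s.2.2) (head + 1)

def bfs_island_labeling_and_edges_alt (N : Int) (arr : List (List Int)) :
    List (List (Int × Int × Int)) :=
  let w := waterOf N arr
  ((PySem.List.pyRange 0 N 1).foldl (fun st r =>
    (PySem.List.pyRange 0 N 1).foldl (fun st c =>
      if g2 st.2.1 r.toNat c.toNat = 1 ∧ g2 st.1 r.toNat c.toNat = 0 then
        let vis := set2 st.1 r.toNat c.toNat 1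
        let a := set2 st.2.1 r.toNat c.toNat st.2.2.1
        let res := loopB N st.2.2.1 (N.toNat * N.toNat + 1) vis a [(r, c)] 0
        (res.1, res.2.1, st.2.2.1 + 1, st.2.2.2 ++ [renderEdges N w res.2.2])
      else st) st)
    (List.replicate N.toNat (List.replicate N.toNat 0), arr, 1, [])).2.2.2

-- ===== PRECONDITION & SPEC =====
-- Pre_ excludes exactly the inputs where Python A raises IndexError: when N > 0 it reads
-- arr[r][c] for every r, c in range(N), so arr needs at least N rows whose first N each
-- have at least N entries.
def Pre_bfs_island_labeling_and_edges (N : Int) (arr : List (List Int)) : Prop :=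
  N ≤ 0 ∨ (N.toNat ≤ arr.length ∧ ∀ row ∈ arr.take N.toNat, N.toNat ≤ row.length)
instance (N : Int) (arr : List (List Int)) : Decidable (Pre_bfs_island_labeling_and_edges N arr) := by
  unfold Pre_bfs_island_labeling_and_edges; infer_instance
def pvWitness_bfs_island_labeling_and_edges : Int × List (List Int) :=
  (2, [[1, 0], [0, 1]])
def Spec_bfs_island_labeling_and_edges (N : Int) (arr : List (List Int)) (out : List (List (Int × Int × Int))) : Prop := out = bfs_island_labeling_and_edges_alt N arr
instance (N : Int) (arr : List (List Int)) (out : List (List (Int × Int × Int))) : Decidable (Spec_bfs_island_labeling_and_edges N arr out) := by unfold Spec_bfs_island_labeling_and_edges; infer_instance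

-- ===== CLAIM (what is proved, stated in full; the proofs are below) =====
def Claim_equal_bfs_island_labeling_and_edges : Prop := ∀ (N : Int) (arr : List (List Int)), Dom_bfs_island_labeling_and_edges N arr → Pre_bfs_island_labeling_and_edges N arr → Spec_bfs_island_labeling_and_edges N arr (bfs_island_labeling_and_edges N arr)


-- ===== LEMMAS AND PROOFS =====

-- zero-set invariant: on in-bounds cells, "this cell of the current arr is 0" is what the
-- water mask says (water cells are never written, island writes write lab ≠ 0 over 1)
def ZS (w : List (List Bool)) (N : Int) (arr : List (List Int)) : Prop :=
  ∀ r c : Nat, r < N.toNat → c < N.toNat → ((g2 arr r c = 0) ↔ wAt w r c = true)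

theorem foldl_bridge {σ : Type} (P : σ → Prop) (f g : σ → Int → σ)
    (h : ∀ s a, P s → f s a = g s a ∧ P (g s a)) :
    ∀ (l : List Int) (s : σ), P s → l.foldl f s = l.foldl g s ∧ P (l.foldl g s) := by
  intro l
  induction l with
  | nil => intro s hs; exact ⟨rfl, hs⟩
  | cons a t ih =>
      intro s hs
      obtain ⟨he, hp⟩ := h s a hs
      simpa [List.foldl_cons, he] using ih (g s a) hp


-- proof-only abbreviations for the fold bodies and outer-loop bodies of the two ports
def fA (N lab r c : Int)
    (st : List (List Int) × List (List Int) × List (Int × Int) × Bool) (d : Int × Int) :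
    List (List Int) × List (List Int) × List (Int × Int) × Bool :=
  let nr := r + d.1
  let nc := c + d.2
  if 0 ≤ nr ∧ nr < N ∧ 0 ≤ nc ∧ nc < N then
    if g2 st.2.1 nr.toNat nc.toNat = 1 ∧ g2 st.1 nr.toNat nc.toNat = 0 then
      (set2 st.1 nr.toNat nc.toNat 1, set2 st.2.1 nr.toNat nc.toNat lab,
       st.2.2.1 ++ [(nr, nc)], st.2.2.2)
    else if g2 st.2.1 nr.toNat nc.toNat = 0 then
      (st.1, st.2.1, st.2.2.1, true)
    else st
  else st

def gB (N lab : Int)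
    (st : List (List Int) × List (List Int) × List (Int × Int)) (p : Int × Int) :
    List (List Int) × List (List Int) × List (Int × Int) :=
  if (0 ≤ p.1 ∧ p.1 < N ∧ 0 ≤ p.2 ∧ p.2 < N) ∧
      g2 st.2.1 p.1.toNat p.2.toNat = 1 ∧ g2 st.1 p.1.toNat p.2.toNat = 0 then
    (set2 st.1 p.1.toNat p.2.toNat 1, set2 st.2.1 p.1.toNat p.2.toNat lab,
     st.2.2 ++ [p])
  else st

theorem nbrs_map (r c : Int) : nbrs r c = pvDirs.map (fun d => (r + d.1, c + d.2)) := by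
  simp [nbrs, pvDirs]
  omega

theorem g2_set2 (arr : List (List Int)) (r c i j : Nat) (v : Int) :
    (g2 (set2 arr r c v) i j = g2 arr i j) ∨
      (i = r ∧ j = c ∧ g2 (set2 arr r c v) i j = v) := by
  unfold g2 set2
  simp only [List.getD_eq_getElem?_getD, List.getElem?_modify]
  by_cases hri : r = i
  · subst hri
    cases harr : arr[r]? with
    | none => left; simp
    | some row =>
      by_cases hcj : c = j
      · subst hcj
        by_cases hlt : c < row.length
        · right
          refine ⟨rfl, rfl, ?_⟩
          simp [hlt]
        · left
          have hnone : row[c]? = none := by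
            rw [List.getElem?_eq_none_iff]; omega
          simp [hlt]
      · left; simp [hcj]
  · left; simp [hri]

theorem ZS_set2 {w : List (List Bool)} {N : Int} {arr : List (List Int)} {r c : Nat} {v : Int}
    (h : ZS w N arr) (hold : g2 arr r c = 1) (hv : v ≠ 0) : ZS w N (set2 arr r c v) := by
  intro i j hi hj
  rcases g2_set2 arr r c i j v with heq | ⟨hir, hjc, heq⟩
  · rw [heq]; exact h i j hi hj
  · subst hir; subst hjc
    rw [heq]
    constructor
    · intro hv0; exact absurd hv0 hv
    · intro hw'
      exfalso
      have h0 := (h i j hi hj).mpr hw'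
      rw [hold] at h0
      exact one_ne_zero h0

theorem ZS_init (N : Int) (arr : List (List Int)) : ZS (waterOf N arr) N arr := by
  intro r c hr hc
  have hN : ((N.toNat : Int)) = N := by omega
  unfold wAt waterOf
  rw [← hN]
  simp only [List.getD_eq_getElem?_getD]
  rw [PySem.List.getElem?_map_pyRange_zero _ _ r hr]
  simp only [Option.getD_some]
  rw [PySem.List.getElem?_map_pyRange_zero _ _ c hc]
  simp [beq_iff_eq]

theorem fold_bridge_aux {w : List (List Bool)} {N lab : Int} (hlab : lab ≠ 0) (r c : Int) :
    ∀ (ds : List (Int × Int)) (vis arr : List (List Int)) (q : List (Int × Int)) (e : Bool),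
      ZS w N arr →
      (ds.foldl (fA N lab r c) (vis, arr, q, e) =
        (((ds.map (fun d => (r + d.1, c + d.2))).foldl (gB N lab) (vis, arr, q)).1,
         ((ds.map (fun d => (r + d.1, c + d.2))).foldl (gB N lab) (vis, arr, q)).2.1,
         ((ds.map (fun d => (r + d.1, c + d.2))).foldl (gB N lab) (vis, arr, q)).2.2,
         e || (ds.map (fun d => (r + d.1, c + d.2))).any (fun p =>
            decide (0 ≤ p.1 ∧ p.1 < N ∧ 0 ≤ p.2 ∧ p.2 < N) && wAt w p.1.toNat p.2.toNat))) ∧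
      ZS w N ((ds.map (fun d => (r + d.1, c + d.2))).foldl (gB N lab) (vis, arr, q)).2.1 := by
  intro ds
  induction ds with
  | nil => intro vis arr q e hZS; exact ⟨by simp, hZS⟩
  | cons d t ih =>
      intro vis arr q e hZS
      by_cases hb : 0 ≤ r + d.1 ∧ r + d.1 < N ∧ 0 ≤ c + d.2 ∧ c + d.2 < N
      · have hrn : (r + d.1).toNat < N.toNat := by omega
        have hcn : (c + d.2).toNat < N.toNat := by omega
        have hzs := hZS (r + d.1).toNat (c + d.2).toNat hrn hcn
        by_cases h1 : g2 arr (r + d.1).toNat (c + d.2).toNat = 1 ∧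
            g2 vis (r + d.1).toNat (c + d.2).toNat = 0
        · have hw : wAt w (r + d.1).toNat (c + d.2).toNat = false := by
            cases hwc : wAt w (r + d.1).toNat (c + d.2).toNat with
            | false => rfl
            | true =>
                exfalso
                have h0 := hzs.mpr hwc
                rw [h1.1] at h0
                exact one_ne_zero h0
          have hZS' : ZS w N (set2 arr (r + d.1).toNat (c + d.2).toNat lab) :=
            ZS_set2 hZS h1.1 hlab
          have := ih (set2 vis (r + d.1).toNat (c + d.2).toNat 1)
            (set2 arr (r + d.1).toNat (c + d.2).toNat lab) (q ++ [(r + d.1, c + d.2)]) e hZS'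
          simpa [fA, gB, hb, h1, hw] using this
        · by_cases h0 : g2 arr (r + d.1).toNat (c + d.2).toNat = 0
          · have hw : wAt w (r + d.1).toNat (c + d.2).toNat = true := hzs.mp h0
            have := ih vis arr q true hZS
            simpa [fA, gB, hb, h1, h0, hw] using this
          · have hw : wAt w (r + d.1).toNat (c + d.2).toNat = false := by
              cases hwc : wAt w (r + d.1).toNat (c + d.2).toNat with
              | false => rfl
              | true => exact absurd (hzs.mpr hwc) h0
            have := ih vis arr q e hZS
            simpa [fA, gB, hb, h1, h0, hw] using this
      · simp only [List.map_cons, List.foldl_cons, List.any_cons]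
        rw [show fA N lab r c (vis, arr, q, e) d = (vis, arr, q, e) from by simp [fA, hb],
            show gB N lab (vis, arr, q) (r + d.1, c + d.2) = (vis, arr, q) from by
              simp [gB, hb]]
        have := ih vis arr q e hZS
        refine ⟨?_, this.2⟩
        rw [this.1,
          show (decide (0 ≤ r + d.1 ∧ r + d.1 < N ∧ 0 ≤ c + d.2 ∧ c + d.2 < N) &&
              wAt w (r + d.1).toNat (c + d.2).toNat) = false from by
            rw [decide_eq_false hb]; exact Bool.false_and _,
          Bool.false_or]

theorem step_bridge {w : List (List Bool)} {N lab : Int}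
    (hlab : lab ≠ 0) (vis arr : List (List Int)) (r c : Int) (hZS : ZS w N arr) :
    stepA N lab vis arr r c =
      ((stepB N lab vis arr r c).1, (stepB N lab vis arr r c).2.1,
       (stepB N lab vis arr r c).2.2, hasWaterNbr N w r c) ∧
      ZS w N (stepB N lab vis arr r c).2.1 := by
  have hA : stepA N lab vis arr r c = pvDirs.foldl (fA N lab r c) (vis, arr, [], false) := rfl
  have hB : stepB N lab vis arr r c = (nbrs r c).foldl (gB N lab) (vis, arr, []) := rfl
  have h := fold_bridge_aux (w := w) hlab r c pvDirs vis arr [] false hZS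
  rw [hA, hB, nbrs_map]
  refine ⟨?_, h.2⟩
  rw [h.1]
  simp [hasWaterNbr, nbrs_map]

theorem renderEdges_append (N : Int) (w : List (List Bool)) (cells : List (Int × Int))
    (r c : Int) :
    renderEdges N w (cells ++ [(r, c)]) =
      renderEdges N w cells ++ (if hasWaterNbr N w r c then [(r, c, 0)] else []) := by
  by_cases h : hasWaterNbr N w r c <;>
    simp [renderEdges, List.filter_append, h]

theorem loop_bridge {w : List (List Bool)} {N lab : Int} (hlab : lab ≠ 0) :
    ∀ (f : Nat) (vis arr : List (List Int)) (queue : List (Int × Int)) (head : Nat),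
      head ≤ queue.length → ZS w N arr →
      (loopA N lab f vis arr (queue.drop head) (renderEdges N w (queue.take head)) =
        ((loopB N lab f vis arr queue head).1, (loopB N lab f vis arr queue head).2.1,
         renderEdges N w (loopB N lab f vis arr queue head).2.2)) ∧
      ZS w N (loopB N lab f vis arr queue head).2.1 := by
  intro f
  induction f with
  | zero => intro vis arr queue head _ hZS; exact ⟨by simp [loopA, loopB], hZS⟩
  | succ f ih =>
      intro vis arr queue head hle hZS
      cases hq : queue[head]? with
      | none =>
          have hlen : queue.length ≤ head := List.getElem?_eq_none_iff.mp hq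
          have hhead : head = queue.length := le_antisymm hle hlen
          have hdrop : queue.drop head = [] := by
            rw [hhead]; exact List.drop_length
          have htake : queue.take head = queue := by
            rw [hhead]; exact List.take_length
          refine ⟨?_, ?_⟩
          · rw [hdrop, htake]
            simp [loopA, loopB, hq]
          · simpa [loopB, hq] using hZS
      | some p =>
          obtain ⟨r, c⟩ := p
          obtain ⟨hlt, hget⟩ := List.getElem?_eq_some_iff.mp hq
          obtain ⟨hstep, hZS'⟩ := step_bridge hlab vis arr r c hZS
          have hdrop : queue.drop head = (r, c) :: queue.drop (head + 1) :=
            hget ▸ List.drop_eq_getElem_cons hlt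
          have hdrop' : queue.drop (head + 1) ++ (stepB N lab vis arr r c).2.2 =
              (queue ++ (stepB N lab vis arr r c).2.2).drop (head + 1) :=
            (List.drop_append_of_le_length (by omega)).symm
          have htake : queue.take head ++ [(r, c)] = (queue ++ (stepB N lab vis arr r c).2.2).take (head + 1) := by
            rw [List.take_append_of_le_length (by omega), List.take_add_one, hq]
            rfl
          have hrec := ih (stepB N lab vis arr r c).1 (stepB N lab vis arr r c).2.1
            (queue ++ (stepB N lab vis arr r c).2.2) (head + 1)
            (by simp; omega) hZS'
          constructor
          · rw [hdrop]
            show loopA N lab (f + 1) vis arr ((r, c) :: queue.drop (head + 1))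
                (renderEdges N w (queue.take head)) = _
            rw [loopA, hstep]
            simp only
            rw [← renderEdges_append, htake, hdrop', hrec.1]
            simp [loopB, hq]
          · simpa [loopB, hq] using hrec.2

-- the outer-loop state: (visited, arr, label, edges)
def OSt : Type := List (List Int) × List (List Int) × Int × List (List (Int × Int × Int))

def cellA (N r : Int) (st : OSt) (c : Int) : OSt :=
  if g2 st.2.1 r.toNat c.toNat = 1 ∧ g2 st.1 r.toNat c.toNat = 0 then
    let vis := set2 st.1 r.toNat c.toNat 1
    let a := set2 st.2.1 r.toNat c.toNat st.2.2.1
    let res := loopA N st.2.2.1 (N.toNat * N.toNat + 1) vis a [(r, c)] []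
    (res.1, res.2.1, st.2.2.1 + 1, st.2.2.2 ++ [res.2.2])
  else st

def cellB (N : Int) (w : List (List Bool)) (r : Int) (st : OSt) (c : Int) : OSt :=
  if g2 st.2.1 r.toNat c.toNat = 1 ∧ g2 st.1 r.toNat c.toNat = 0 then
    let vis := set2 st.1 r.toNat c.toNat 1
    let a := set2 st.2.1 r.toNat c.toNat st.2.2.1
    let res := loopB N st.2.2.1 (N.toNat * N.toNat + 1) vis a [(r, c)] 0
    (res.1, res.2.1, st.2.2.1 + 1, st.2.2.2 ++ [renderEdges N w res.2.2])
  else st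

def POSt (w : List (List Bool)) (N : Int) (st : OSt) : Prop :=
  ZS w N st.2.1 ∧ 1 ≤ st.2.2.1

theorem cell_bridge {w : List (List Bool)} {N : Int} (r : Int) :
    ∀ (st : OSt) (c : Int), POSt w N st →
      cellA N r st c = cellB N w r st c ∧ POSt w N (cellB N w r st c) := by
  intro st c hP
  obtain ⟨hZS, hlab⟩ := hP
  by_cases hc : g2 st.2.1 r.toNat c.toNat = 1 ∧ g2 st.1 r.toNat c.toNat = 0
  · have hlab0 : st.2.2.1 ≠ 0 := by omega
    have hZSa : ZS w N (set2 st.2.1 r.toNat c.toNat st.2.2.1) :=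
      ZS_set2 hZS hc.1 hlab0
    have hbr := loop_bridge (w := w) hlab0 (N.toNat * N.toNat + 1)
      (set2 st.1 r.toNat c.toNat 1) (set2 st.2.1 r.toNat c.toNat st.2.2.1)
      [(r, c)] 0 (by simp) hZSa
    have hre : renderEdges N w ([] : List (Int × Int)) = [] := rfl
    have hbr1 := hbr.1
    simp only [List.drop_zero, List.take_zero] at hbr1
    constructor
    · simp only [cellA, cellB, hc]
      rw [← hre, hbr1]
    · refine ⟨?_, ?_⟩
      · simpa [cellB, hc] using hbr.2
      · simp [cellB, hc]; omega
  · exact ⟨by simp [cellA, cellB, hc], ⟨by simpa [cellB, hc] using hZS,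
      by simpa [cellB, hc] using hlab⟩⟩

theorem row_bridge {w : List (List Bool)} {N : Int} :
    ∀ (st : OSt) (r : Int), POSt w N st →
      (PySem.List.pyRange 0 N 1).foldl (cellA N r) st =
        (PySem.List.pyRange 0 N 1).foldl (cellB N w r) st ∧
      POSt w N ((PySem.List.pyRange 0 N 1).foldl (cellB N w r) st) := by
  intro st r hP
  exact foldl_bridge (POSt w N) (cellA N r) (cellB N w r) (cell_bridge r)
    (PySem.List.pyRange 0 N 1) st hP

-- ===== VERDICT (by name: the statement is the Claim_ definition above) =====
theorem bfs_island_labeling_and_edges_spec : Claim_equal_bfs_island_labeling_and_edges := by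
  intro N arr _ _
  unfold Spec_bfs_island_labeling_and_edges
  have hA : bfs_island_labeling_and_edges N arr =
      ((PySem.List.pyRange 0 N 1).foldl (fun st r =>
        (PySem.List.pyRange 0 N 1).foldl (cellA N r) st)
        ((List.replicate N.toNat (List.replicate N.toNat 0), arr, 1, []) : OSt)).2.2.2 := rfl
  have hB : bfs_island_labeling_and_edges_alt N arr =
      ((PySem.List.pyRange 0 N 1).foldl (fun st r =>
        (PySem.List.pyRange 0 N 1).foldl (cellB N (waterOf N arr) r) st)
        ((List.replicate N.toNat (List.replicate N.toNat 0), arr, 1, []) : OSt)).2.2.2 := rfl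
  rw [hA, hB]
  have hinit : POSt (waterOf N arr) N
      ((List.replicate N.toNat (List.replicate N.toNat 0), arr, 1, []) : OSt) :=
    ⟨ZS_init N arr, le_refl 1⟩
  have h := foldl_bridge (POSt (waterOf N arr) N)
    (fun st r => (PySem.List.pyRange 0 N 1).foldl (cellA N r) st)
    (fun st r => (PySem.List.pyRange 0 N 1).foldl (cellB N (waterOf N arr) r) st)
    (fun st r hP => row_bridge st r hP)
    (PySem.List.pyRange 0 N 1)
    ((List.replicate N.toNat (List.replicate N.toNat 0), arr, 1, []) : OSt) hinit
  rw [h.1]
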